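-- pv_equiv track=rewrite | github.com/daren996/ReDD | src/redd/core/utils/sql_filter_parser.py | _has_wrapping_parentheses
-- ===== SOURCE A (Python) =====
-- def _has_wrapping_parentheses(value: str) -> bool:
--     depth = 0
--     for index, char in enumerate(value):
--         if char == "(":
--             depth += 1
--         elif char == ")":
--             depth -= 1
--             if depth == 0 and index != len(value) - 1:
--                 return False
--         if depth < 0:
--             return False
--     return depth == 0
-- ===== SOURCE B (Python) =====
-- def _has_wrapping_parentheses(value: str) -> bool:
--     i = value.find("(")
--     j = value.find(")")
--     if i == -1 and j == -1:
--         return True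
--     if i == -1 or (j != -1 and j < i) or not value.endswith(")"):
--         return False
--     p = "".join(c for c in value[i + 1:-1] if c in "()")
--     k = p.find("()")
--     while k != -1:
--         p = p[:k] + p[k + 2:]
--         k = p.find("()")
--     return p == ""
-- ===== Notes on version B (the rewrite author's own statement) =====
-- stated objective: alternative
-- what changed: A streams a depth counter with per-character early returns; B has no counter: it decomposes the string structurally (position of the first opening and the first closing parenthesis, required trailing closer) and decides the interior by repeatedly deleting adjacent open-close pairs until none remain, returning True iff nothing is left; B's per-character work happens inside C-level find/join/slice primitives rather than a Python-level loop.
import Mathlib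
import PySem

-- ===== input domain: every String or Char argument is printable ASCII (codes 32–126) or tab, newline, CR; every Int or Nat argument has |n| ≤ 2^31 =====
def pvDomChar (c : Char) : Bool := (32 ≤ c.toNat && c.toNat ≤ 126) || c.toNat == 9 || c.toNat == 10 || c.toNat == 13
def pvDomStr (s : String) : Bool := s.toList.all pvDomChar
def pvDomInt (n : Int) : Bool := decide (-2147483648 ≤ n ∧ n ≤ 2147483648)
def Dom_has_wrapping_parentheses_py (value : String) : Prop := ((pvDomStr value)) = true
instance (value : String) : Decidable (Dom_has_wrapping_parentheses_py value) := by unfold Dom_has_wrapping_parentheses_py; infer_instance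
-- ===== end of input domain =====

-- B replaces A's streaming depth counter by a structural decomposition (first opening paren via
-- find, first closing paren must not precede it, required trailing closer) plus a rewrite check
-- that repeatedly cancels adjacent open-close pairs in the interior; alternative algorithm with
-- no depth counter (a timing run measured B faster via C-level string primitives).

-- ===== PORT A =====
-- loop over `enumerate(value)` carrying the index and total length; early returns become Bool results
def hwpALoop (n : Nat) : List Char → Nat → Int → Bool
  | [], _, depth => depth == 0
  | c :: rest, i, depth =>
    -- depth update: '(' → +1, ')' → −1, else unchanged
    let d1 : Int := if c = '(' then depth + 1 else if c = ')' then depth - 1 else depth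
    -- inner early return (only reached in the ')' branch), then the `depth < 0` check
    if c = ')' ∧ d1 = 0 ∧ i ≠ n - 1 then false
    else if d1 < 0 then false
    else hwpALoop n rest (i + 1) d1

def has_wrapping_parentheses_py (value : String) : Bool :=
  hwpALoop value.toList.length value.toList 0 0

-- ===== PORT B =====
def hwpReduceGo : Nat → List Char → List Char
  | 0, p => p
  | fuel + 1, p =>
    let k := PySem.Chars.find p ['(', ')']
    if k = -1 then p
    else hwpReduceGo fuel (PySem.List.slice p none (some k) ++ PySem.List.slice p (some (k + 2)) none)

def hwpReduce (p : List Char) : List Char := hwpReduceGo p.length p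

def has_wrapping_parentheses_py_alt (value : String) : Bool :=
  let i := PySem.Str.find value "("
  let j := PySem.Str.find value ")"
  if i = -1 ∧ j = -1 then true
  else if i = -1 ∨ (¬ j = -1 ∧ j < i) ∨ PySem.Str.endswith value ")" = false then false
  else
    -- `"".join(c for c in value[i+1:-1] if c in "()")`
    let p := (PySem.Str.slice value (some (i + 1)) (some (-1))).toList.filter
               (fun c => c == '(' || c == ')')
    (hwpReduce p).isEmpty

-- ===== PRECONDITION & SPEC =====
def Spec_has_wrapping_parentheses_py (value : String) (out : Bool) : Prop := out = has_wrapping_parentheses_py_alt value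
instance (value : String) (out : Bool) : Decidable (Spec_has_wrapping_parentheses_py value out) := by unfold Spec_has_wrapping_parentheses_py; infer_instance

-- ===== CLAIM (what is proved, stated in full; the proofs are below) =====
def Claim_equal_has_wrapping_parentheses_py : Prop := ∀ (value : String), Dom_has_wrapping_parentheses_py value → Spec_has_wrapping_parentheses_py value (has_wrapping_parentheses_py value)

-- ===== LEMMAS AND PROOFS =====

-- a found "()" occurrence leaves room for two characters
theorem hwp_find_room (p : List Char) (h : ¬ PySem.Chars.find p ['(', ')'] = -1) :
    0 ≤ PySem.Chars.find p ['(', ')'] ∧ (PySem.Chars.find p ['(', ')']).toNat + 2 ≤ p.length := by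
  have h0 : 0 ≤ PySem.Chars.find p ['(', ')'] := by
    rcases (PySem.Chars.find_nonneg_iff p ['(', ')']).mpr
      ((not_iff_not.mpr (PySem.Chars.find_eq_neg_one_iff p ['(', ')'])).mp h |> not_not.mp) with h'
    exact h'
  refine ⟨h0, ?_⟩
  have hpre := (PySem.Chars.find_spec h0).1
  have hlen := hpre.length_le
  simp [List.length_drop] at hlen
  have hk := (PySem.Chars.find_nonneg_iff p ['(', ')']).mp h0
  have := hk.length_le
  simp at this
  omega

-- `while k != -1: p = p[:k] + p[k+2:]; k = p.find("()")`
-- (fuel-based structural recursion; each iteration removes two characters, so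
-- `p.length` steps of fuel always suffice — the fuel is only a totality guard)

-- A without the index bookkeeping: `index != len - 1` becomes `rest ≠ []`
def hwpUpd (c : Char) (d : Int) : Int := if c = '(' then d + 1 else if c = ')' then d - 1 else d

def hwpOk : List Char → Int → Bool
  | [], depth => depth == 0
  | c :: rest, depth =>
    if c = ')' ∧ hwpUpd c depth = 0 ∧ rest ≠ [] then false
    else if hwpUpd c depth < 0 then false
    else hwpOk rest (hwpUpd c depth)

theorem hwpOk_cons (c : Char) (rest : List Char) (d : Int) :
    hwpOk (c :: rest) d =
      (if c = ')' ∧ hwpUpd c d = 0 ∧ rest ≠ [] then false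
       else if hwpUpd c d < 0 then false
       else hwpOk rest (hwpUpd c d)) := rfl

theorem hwpUpd_shift (c : Char) (d : Int) : hwpUpd c (d - 1) = hwpUpd c d - 1 := by
  unfold hwpUpd; split_ifs <;> omega

theorem hwpUpd_close (d : Int) : hwpUpd ')' d = d - 1 := by simp [hwpUpd]

theorem hwpUpd_ge (c : Char) (d : Int) (hc : ¬ c = ')') : d ≤ hwpUpd c d := by
  unfold hwpUpd; split_ifs <;> omega

-- A's indexed loop equals the index-free recursion (invariant n = i + length)
theorem aLoop_eq_ok (cs : List Char) (i : Nat) (d : Int) :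
    hwpALoop (i + cs.length) cs i d = hwpOk cs d := by
  induction cs generalizing i d with
  | nil => simp [hwpALoop, hwpOk]
  | cons c rest ih =>
    have hidx : (i ≠ i + (c :: rest).length - 1) ↔ rest ≠ [] := by
      cases rest <;> simp
    have ih' := ih (i + 1)
    rw [hwpALoop, hwpOk_cons]
    simp only [hwpUpd, hidx]
    have hn : i + (c :: rest).length = (i + 1) + rest.length := by simp; omega
    rw [hn]
    split_ifs with h1 h2 <;> simp [ih']

-- the plain balancedness check (depth never negative, ends at 0), proof-side only
def hwpBal : List Char → Int → Bool
  | [], d => d == 0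
  | c :: r, d => if hwpUpd c d < 0 then false else hwpBal r (hwpUpd c d)

theorem hwpBal_cons (c : Char) (r : List Char) (d : Int) :
    hwpBal (c :: r) d = (if hwpUpd c d < 0 then false else hwpBal r (hwpUpd c d)) := rfl

theorem ok_no_parens (cs : List Char) (h : ∀ c ∈ cs, ¬ c = '(' ∧ ¬ c = ')') :
    hwpOk cs 0 = true := by
  induction cs with
  | nil => simp [hwpOk]
  | cons c r ih =>
    obtain ⟨h1, h2⟩ := h c (by simp)
    rw [hwpOk_cons]
    simp [hwpUpd, h1, h2]
    exact ih fun x hx => h x (by simp [hx])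

theorem ok_first_close (u v : List Char) (h1 : '(' ∉ u) (h2 : ')' ∉ u) :
    hwpOk (u ++ ')' :: v) 0 = false := by
  induction u with
  | nil => rw [List.nil_append, hwpOk_cons]; simp [hwpUpd]
  | cons c u' ih =>
    have hc1 : ¬ c = '(' := by intro h; exact h1 (by simp [h])
    have hc2 : ¬ c = ')' := by intro h; exact h2 (by simp [h])
    rw [List.cons_append, hwpOk_cons]
    simp [hwpUpd, hc1, hc2]
    exact ih (by intro h; exact h1 (by simp [h])) (by intro h; exact h2 (by simp [h]))

theorem ok_skip_pre (u rest : List Char) (h1 : '(' ∉ u) (h2 : ')' ∉ u) :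
    hwpOk (u ++ rest) 0 = hwpOk rest 0 := by
  induction u with
  | nil => simp
  | cons c u' ih =>
    have hc1 : ¬ c = '(' := by intro h; exact h1 (by simp [h])
    have hc2 : ¬ c = ')' := by intro h; exact h2 (by simp [h])
    rw [List.cons_append, hwpOk_cons]
    simp [hwpUpd, hc1, hc2]
    exact ih (by intro h; exact h1 (by simp [h])) (by intro h; exact h2 (by simp [h]))

theorem ok_open (w : List Char) : hwpOk ('(' :: w) 0 = hwpOk w 1 := by
  rw [hwpOk_cons]; simp [hwpUpd]

theorem ok_no_close_end (w : List Char) (d : Int) (hd : 1 ≤ d)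
    (h : w.getLast? ≠ some ')') : hwpOk w d = false := by
  induction w generalizing d with
  | nil => simp [hwpOk]; omega
  | cons c r ih =>
    rw [hwpOk_cons]
    cases r with
    | nil =>
      have hc : ¬ c = ')' := by intro hc; exact h (by simp [hc])
      have := hwpUpd_ge c d hc
      simp [hwpOk, hc]
      omega
    | cons x xs =>
      have hlast : (x :: xs).getLast? ≠ some ')' := by
        simpa [List.getLast?_cons_cons] using h
      split_ifs with hA hB
      · rfl
      · rfl
      · apply ih _ _ hlast
        by_cases hc : c = ')'
        · rw [hc, hwpUpd_close] at hA hB ⊢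
          simp at hA
          omega
        · have := hwpUpd_ge c d hc
          omega

theorem ok_mid (mid : List Char) (d : Int) (hd : 1 ≤ d) :
    hwpOk (mid ++ [')']) d = hwpBal mid (d - 1) := by
  induction mid generalizing d with
  | nil =>
    rw [List.nil_append, hwpOk_cons]
    simp [hwpUpd_close, hwpOk, hwpBal]
    omega
  | cons c r ih =>
    rw [List.cons_append, hwpOk_cons, hwpBal_cons, hwpUpd_shift]
    by_cases hc : c = ')'
    · rw [hc, hwpUpd_close]
      rcases Decidable.em (d - 1 = 0) with h0 | h0
      · simp [h0]
      · have h1 : 1 ≤ d - 1 := by omega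
        have h2 : ¬ d - 1 < 0 := by omega
        have h3 : ¬ d - 1 - 1 < 0 := by omega
        simp [h0, h2, h3]
        exact ih _ h1
    · have hge := hwpUpd_ge c d hc
      have h1 : 1 ≤ hwpUpd c d := by omega
      have h2 : ¬ hwpUpd c d < 0 := by omega
      have h3 : ¬ hwpUpd c d - 1 < 0 := by omega
      simp [hc, h2, h3]
      exact ih _ h1

theorem bal_filter (cs : List Char) (d : Int) (hd : 0 ≤ d) :
    hwpBal cs d = hwpBal (cs.filter (fun c => c == '(' || c == ')')) d := by
  induction cs generalizing d with
  | nil => rfl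
  | cons c r ih =>
    rw [List.filter_cons]
    by_cases hf : (c == '(' || c == ')') = true
    · rw [if_pos hf, hwpBal_cons, hwpBal_cons]
      by_cases hlt : hwpUpd c d < 0
      · simp [hlt]
      · have h0 : 0 ≤ hwpUpd c d := by omega
        simp [hlt, ih _ h0]
    · rw [if_neg hf, hwpBal_cons]
      simp only [Bool.or_eq_true, beq_iff_eq, not_or] at hf
      have hu : hwpUpd c d = d := by simp [hwpUpd, hf.1, hf.2]
      have hlt : ¬ d < 0 := by omega
      rw [hu, if_neg hlt]
      exact ih _ hd

theorem bal_cancel (u v : List Char) (d : Int) (hd : 0 ≤ d) :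
    hwpBal (u ++ '(' :: ')' :: v) d = hwpBal (u ++ v) d := by
  induction u generalizing d with
  | nil =>
    simp only [List.nil_append, hwpBal_cons]
    have h1 : hwpUpd '(' d = d + 1 := by simp [hwpUpd]
    have h2 : hwpUpd ')' (d + 1) = d := by simp [hwpUpd]
    rw [h1]
    have : ¬ d + 1 < 0 := by omega
    simp [this, h2]
    omega
  | cons c u' ih =>
    simp only [List.cons_append, hwpBal_cons]
    split_ifs with h
    · rfl
    · exact ih _ (by omega)

-- the found "()" occurrence splits the list
theorem find_split (p : List Char) (h : ¬ PySem.Chars.find p ['(', ')'] = -1) :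
    p = p.take (PySem.Chars.find p ['(', ')']).toNat ++
        '(' :: ')' :: p.drop ((PySem.Chars.find p ['(', ')']).toNat + 2) := by
  have h0 : 0 ≤ PySem.Chars.find p ['(', ')'] := by
    rw [PySem.Chars.find_nonneg_iff]
    exact not_not.mp ((not_iff_not.mpr (PySem.Chars.find_eq_neg_one_iff p ['(', ')'])).mp h)
  obtain ⟨hpre, _⟩ := PySem.Chars.find_spec h0
  set k := (PySem.Chars.find p ['(', ')']).toNat with hk
  obtain ⟨t, ht⟩ := hpre
  have hdrop2 : p.drop (k + 2) = t := by
    have h2 : p.drop (k + 2) = (p.drop k).drop 2 := by rw [List.drop_drop]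
    rw [h2, ← ht]
    try rfl
  rw [hdrop2, show ('(' :: ')' :: t) = ['(', ')'] ++ t from rfl, ht]
  exact (List.take_append_drop k p).symm

theorem hwp_step_len (p : List Char) (h : ¬ PySem.Chars.find p ['(', ')'] = -1) :
    (PySem.List.slice p none (some (PySem.Chars.find p ['(', ')'])) ++
      PySem.List.slice p (some (PySem.Chars.find p ['(', ')'] + 2))).length = p.length - 2 := by
  obtain ⟨h0, h2⟩ := hwp_find_room p h
  rw [PySem.List.slice_to p h0, PySem.List.slice_from p (by omega : (0:Int) ≤ PySem.Chars.find p ['(', ')'] + 2)]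
  have htn : (PySem.Chars.find p ['(', ')'] + 2).toNat = (PySem.Chars.find p ['(', ')']).toNat + 2 := by omega
  rw [htn]
  simp [List.length_append, List.length_take, List.length_drop]
  omega

theorem reduceGo_bal (fuel : Nat) : ∀ p : List Char, p.length ≤ fuel →
    hwpBal (hwpReduceGo fuel p) 0 = hwpBal p 0 := by
  induction fuel with
  | zero =>
    intro p hp
    rfl
  | succ fuel ih =>
    intro p hp
    rw [hwpReduceGo]
    by_cases hk : PySem.Chars.find p ['(', ')'] = -1
    · simp [hk]
    · simp only [if_neg hk]
      have h0 := (hwp_find_room p hk).1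
      have h2 := (hwp_find_room p hk).2
      have hlen := hwp_step_len p hk
      rw [ih _ (by omega)]
      rw [PySem.List.slice_to p h0,
        PySem.List.slice_from p (by omega : (0:Int) ≤ PySem.Chars.find p ['(', ')'] + 2)]
      have htn : (PySem.Chars.find p ['(', ')'] + 2).toNat = (PySem.Chars.find p ['(', ')']).toNat + 2 := by omega
      rw [htn]
      conv_rhs => rw [find_split p hk]
      rw [bal_cancel _ _ _ le_rfl]

theorem reduce_bal (p : List Char) : hwpBal (hwpReduce p) 0 = hwpBal p 0 :=
  reduceGo_bal p.length p le_rfl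

theorem reduceGo_no_pair (fuel : Nat) : ∀ p : List Char, p.length ≤ fuel →
    ¬ (['(', ')'] <:+: hwpReduceGo fuel p) := by
  induction fuel with
  | zero =>
    intro p hp
    have hp0 : p = [] := List.length_eq_zero_iff.mp (by omega)
    subst hp0
    intro h
    rw [show hwpReduceGo 0 [] = [] from rfl] at h
    have := h.length_le
    simp at this
  | succ fuel ih =>
    intro p hp
    rw [hwpReduceGo]
    by_cases hk : PySem.Chars.find p ['(', ')'] = -1
    · simp only [if_pos hk]
      exact (PySem.Chars.find_eq_neg_one_iff p ['(', ')']).mp hk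
    · simp only [if_neg hk]
      have hlen := hwp_step_len p hk
      have h2 := (hwp_find_room p hk).2
      exact ih _ (by omega)

theorem reduce_no_pair (p : List Char) : ¬ (['(', ')'] <:+: hwpReduce p) :=
  reduceGo_no_pair p.length p le_rfl

theorem reduceGo_parenOnly (fuel : Nat) : ∀ p : List Char, p.length ≤ fuel →
    (∀ c ∈ p, c = '(' ∨ c = ')') → ∀ c ∈ hwpReduceGo fuel p, c = '(' ∨ c = ')' := by
  induction fuel with
  | zero =>
    intro p hp h
    exact h
  | succ fuel ih =>
    intro p hp h
    rw [hwpReduceGo]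
    by_cases hk : PySem.Chars.find p ['(', ')'] = -1
    · simp only [if_pos hk]; exact h
    · simp only [if_neg hk]
      have hlen := hwp_step_len p hk
      have h2 := (hwp_find_room p hk).2
      apply ih _ (by omega)
      intro c hc
      obtain ⟨h0, _⟩ := hwp_find_room p hk
      rw [PySem.List.slice_to p h0,
        PySem.List.slice_from p (by omega : (0:Int) ≤ PySem.Chars.find p ['(', ')'] + 2)] at hc
      rcases List.mem_append.mp hc with hc | hc
      · exact h c (List.mem_of_mem_take hc)
      · exact h c (List.mem_of_mem_drop hc)

theorem reduce_parenOnly (p : List Char) (h : ∀ c ∈ p, c = '(' ∨ c = ')') :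
    ∀ c ∈ hwpReduce p, c = '(' ∨ c = ')' :=
  reduceGo_parenOnly p.length p le_rfl h

theorem no_pair_open (r : List Char) (hp : ∀ c ∈ r, c = '(' ∨ c = ')')
    (h : ¬ (['(', ')'] <:+: ('(' :: r))) : ∀ c ∈ r, c = '(' := by
  induction r with
  | nil => intro c hc; simp at hc
  | cons x r' ih =>
    have hx : x = '(' := by
      rcases hp x (by simp) with h' | h'
      · exact h'
      · exfalso
        exact h ⟨[], r', by simp [h']⟩
    intro c hc
    rcases List.mem_cons.mp hc with rfl | hc
    · exact hx
    · apply ih (fun y hy => hp y (by simp [hy])) _ c hc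
      intro hinf
      rw [hx] at h
      exact h (List.infix_cons hinf)

theorem bal_all_open (q : List Char) (ho : ∀ c ∈ q, c = '(') (d : Int) (hd : 1 ≤ d) :
    hwpBal q d = false := by
  induction q generalizing d with
  | nil => simp [hwpBal]; omega
  | cons c r ih =>
    have hc := ho c (by simp)
    rw [hwpBal_cons, hc]
    have h1 : hwpUpd '(' d = d + 1 := by simp [hwpUpd]
    rw [h1]
    have : ¬ d + 1 < 0 := by omega
    simp [this]
    exact ih (fun y hy => ho y (by simp [hy])) _ (by omega)

theorem bal_reduced (p : List Char) (hp : ∀ c ∈ p, c = '(' ∨ c = ')')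
    (hnp : ¬ (['(', ')'] <:+: p)) : hwpBal p 0 = p.isEmpty := by
  cases p with
  | nil => rfl
  | cons c r =>
    rcases hp c (by simp) with rfl | rfl
    · rw [hwpBal_cons]
      have h1 : hwpUpd '(' (0:Int) = 1 := by simp [hwpUpd]
      rw [h1]
      simp only [show ¬ (1:Int) < 0 by omega, if_false]
      rw [bal_all_open r (no_pair_open r (fun y hy => hp y (by simp [hy])) hnp) 1 le_rfl]
      rfl
    · rw [hwpBal_cons, hwpUpd_close]
      simp

theorem mem_iff_singleton_infix (c : Char) (cs : List Char) :
    [c] <:+: cs ↔ c ∈ cs := by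
  constructor
  · intro h
    exact List.singleton_sublist.mp h.sublist
  · intro h
    obtain ⟨s, t, rfl⟩ := List.append_of_mem h
    exact ⟨s, t, by simp⟩

theorem suffix_singleton_iff (c : Char) (cs : List Char) :
    [c] <:+ cs ↔ cs.getLast? = some c := by
  constructor
  · intro ⟨s, hs⟩
    rw [← hs, List.getLast?_append]
    rfl
  · intro h
    obtain ⟨ys, rfl⟩ := List.getLast?_eq_some_iff.mp h
    exact ⟨ys, rfl⟩

theorem findChar_split (cs : List Char) (c : Char) (h : c ∈ cs) :
    0 ≤ PySem.Chars.find cs [c] ∧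
      cs.drop (PySem.Chars.find cs [c]).toNat =
        c :: cs.drop ((PySem.Chars.find cs [c]).toNat + 1) ∧
      c ∉ cs.take (PySem.Chars.find cs [c]).toNat := by
  have h0 : 0 ≤ PySem.Chars.find cs [c] := by
    rw [PySem.Chars.find_nonneg_iff, mem_iff_singleton_infix]; exact h
  obtain ⟨hpre, hmin⟩ := PySem.Chars.find_spec h0
  set k := (PySem.Chars.find cs [c]).toNat with hk
  obtain ⟨t, ht⟩ := hpre
  refine ⟨h0, ?_, ?_⟩
  · rw [← ht]
    have h2 : cs.drop (k + 1) = (cs.drop k).drop 1 := by rw [List.drop_drop]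
    rw [h2, ← ht]
    try rfl
  · intro hmem
    obtain ⟨i, hi, hgt⟩ := List.getElem_of_mem hmem
    have hik : i < k := by
      have h2 := hi
      rw [List.length_take] at h2
      exact lt_of_lt_of_le h2 (min_le_left _ _)
    apply hmin i hik
    have hil : i < cs.length := by
      have h2 := hi
      rw [List.length_take] at h2
      exact lt_of_lt_of_le h2 (min_le_right _ _)
    have hci : cs[i]'hil = c := by
      have h2 := List.getElem_take (xs := cs) (j := k) (i := i) (h := hi)
      rw [← h2]; exact hgt
    refine ⟨cs.drop (i + 1), ?_⟩
    rw [List.drop_eq_getElem_cons hil, hci]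
    rfl

-- consequences of the two splits used by the main proof
theorem ok_no_trail (u w : List Char) (h1 : '(' ∉ u) (h2 : ')' ∉ u)
    (h3 : (u ++ '(' :: w).getLast? ≠ some ')') : hwpOk (u ++ '(' :: w) 0 = false := by
  rw [ok_skip_pre u _ h1 h2, ok_open]
  cases w with
  | nil => simp [hwpOk]
  | cons x xs =>
    apply ok_no_close_end _ _ le_rfl
    intro hl
    apply h3
    rw [List.getLast?_append]
    simp [List.getLast?_cons_cons] at hl ⊢
    exact hl

theorem getLast?_ne_close (cs : List Char) (h : ')' ∉ cs) : cs.getLast? ≠ some ')' := by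
  intro hl
  obtain ⟨ys, rfl⟩ := List.getLast?_eq_some_iff.mp hl
  exact h (by simp)

-- ===== VERDICT (by name: the statement is the Claim_ definition above) =====
theorem has_wrapping_parentheses_py_spec : Claim_equal_has_wrapping_parentheses_py := by
  intro value _
  unfold Spec_has_wrapping_parentheses_py has_wrapping_parentheses_py has_wrapping_parentheses_py_alt
  have hA : hwpALoop value.toList.length value.toList 0 0 = hwpOk value.toList 0 := by
    have h := aLoop_eq_ok value.toList 0 0
    simpa using h
  rw [hA]
  have tlo : ("(" : String).toList = ['('] := rfl
  have tlc : (")" : String).toList = [')'] := rfl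
  simp only [PySem.Str.find_eq, PySem.Str.endswith_eq, tlo, tlc]
  set cs := value.toList with hcs
  by_cases hmo : '(' ∈ cs
  · -- a '(' exists; split at the first one
    obtain ⟨h0i, hdi, hnoti⟩ := findChar_split cs '(' hmo
    set k1 := (PySem.Chars.find cs ['(']).toNat with hk1
    have hfi_ne : ¬ PySem.Chars.find cs ['('] = -1 := by omega
    have hsplit1 : cs = cs.take k1 ++ '(' :: cs.drop (k1 + 1) := by
      conv_lhs => rw [← List.take_append_drop k1 cs, hdi]
    rw [if_neg (fun h => hfi_ne h.1)]
    by_cases hmc : ')' ∈ cs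
    · obtain ⟨h0j, hdj, hnotj⟩ := findChar_split cs ')' hmc
      set k2 := (PySem.Chars.find cs [')']).toNat with hk2
      have hfj_ne : ¬ PySem.Chars.find cs [')'] = -1 := by omega
      have hsplit2 : cs = cs.take k2 ++ ')' :: cs.drop (k2 + 1) := by
        conv_lhs => rw [← List.take_append_drop k2 cs, hdj]
      by_cases hord : PySem.Chars.find cs [')'] < PySem.Chars.find cs ['(']
      · -- the first ')' comes before the first '(': both sides are False
        rw [if_pos (Or.inr (Or.inl ⟨hfj_ne, hord⟩))]
        have hk21 : k2 ≤ k1 := by omega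
        have hno : '(' ∉ cs.take k2 := by
          intro hmem
          apply hnoti
          have : cs.take k2 = (cs.take k1).take k2 := by rw [List.take_take, min_eq_left hk21]
          rw [this] at hmem
          exact List.mem_of_mem_take hmem
        rw [hsplit2]
        exact ok_first_close _ _ hno hnotj
      · have hk12 : k1 ≤ k2 := by omega
        have hnotc1 : ')' ∉ cs.take k1 := by
          intro hmem
          apply hnotj
          have : cs.take k1 = (cs.take k2).take k1 := by rw [List.take_take, min_eq_left hk12]
          rw [this] at hmem
          exact List.mem_of_mem_take hmem
        by_cases hend : cs.getLast? = some ')'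
        · -- main case: interior must reduce to the empty string
          have hendT : PySem.Chars.endswith cs [')'] = true := by
            rw [PySem.Chars.endswith_iff, suffix_singleton_iff]
            exact hend
          rw [if_neg (by
            intro h
            rcases h with h | h | h
            · exact hfi_ne h
            · exact hord h.2
            · rw [hendT] at h; cases h)]
          -- the slice value[i+1:-1] is the interior after the first '('
          have hk1n : k1 < cs.length := by
            have hne : cs.drop k1 ≠ [] := by rw [hdi]; simp
            by_contra hle
            exact hne (List.drop_eq_nil_iff.mpr (by omega))
          have hfi_cast : PySem.Chars.find cs ['('] = (k1 : Int) := by omega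
          have hcl : PySem.List.clampIdx cs.length ((k1 : Int) + 1) = k1 + 1 := by
            rw [show ((k1 : Int) + 1) = ((k1 + 1 : Nat) : Int) by push_cast; ring,
              PySem.List.clampIdx_natCast]
            omega
          have hslice : PySem.List.slice cs (some (PySem.Chars.find cs ['('] + 1)) (some (-1)) =
              (cs.drop (k1 + 1)).take (cs.length - 1 - (k1 + 1)) := by
            rw [hfi_cast]
            simp [PySem.List.slice, hcl]
          rcases List.eq_nil_or_concat (cs.drop (k1 + 1)) with hw | ⟨mid, z, hw⟩
          · -- impossible: the string ends with ')' but the first '(' is its last character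
            exfalso
            rw [hsplit1, hw, List.getLast?_append] at hend
            simp at hend
          · rw [List.concat_eq_append] at hw
            have hz : z = ')' := by
              have h1 : cs.getLast? = some z := by
                rw [hsplit1, hw, show cs.take k1 ++ '(' :: (mid ++ [z]) =
                  (cs.take k1 ++ '(' :: mid) ++ [z] by simp, List.getLast?_concat]
              rw [hend] at h1
              exact (Option.some_inj.mp h1).symm
            -- A's side: skip the prefix, open the group, check the interior
            have hAside : hwpOk cs 0 = hwpBal mid 0 := by
              conv_lhs => rw [hsplit1, hw, hz]
              rw [ok_skip_pre _ _ hnoti hnotc1, ok_open, ok_mid mid 1 le_rfl]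
              norm_num
            rw [hAside]
            -- B's side: the filtered interior
            rw [PySem.Str.toList_slice, PySem.Chars.slice_eq_listSlice, ← hcs, hslice]
            have hmid : (cs.drop (k1 + 1)).take (cs.length - 1 - (k1 + 1)) = mid := by
              have hlw : (cs.drop (k1 + 1)).length = cs.length - (k1 + 1) := by
                simp [List.length_drop]
              rw [show cs.length - 1 - (k1 + 1) = (cs.drop (k1 + 1)).length - 1 by omega,
                ← List.dropLast_eq_take, hw, List.dropLast_concat]
            rw [hmid]
            -- chain of interior characterisations
            have hq := bal_filter mid 0 le_rfl
            rw [hq, ← reduce_bal]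
            apply bal_reduced
            · apply reduce_parenOnly
              intro c hc
              have h2 := List.of_mem_filter hc
              simp at h2
              tauto
            · exact reduce_no_pair _
        · -- no trailing ')': both sides are False
          have hendF : PySem.Chars.endswith cs [')'] = false := by
            rw [← Bool.not_eq_true, PySem.Chars.endswith_iff, suffix_singleton_iff]
            exact hend
          rw [if_pos (Or.inr (Or.inr hendF))]
          rw [hsplit1]
          apply ok_no_trail _ _ hnoti hnotc1
          rw [← hsplit1]
          exact hend
    · -- '(' present but no ')': the string cannot end with ')'
      have hfj : PySem.Chars.find cs [')'] = -1 := by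
        rw [PySem.Chars.find_eq_neg_one_iff, mem_iff_singleton_infix]
        exact hmc
      have hendF : PySem.Chars.endswith cs [')'] = false := by
        rw [← Bool.not_eq_true, PySem.Chars.endswith_iff, suffix_singleton_iff]
        exact getLast?_ne_close cs hmc
      rw [if_pos (Or.inr (Or.inr hendF))]
      have hnotc1 : ')' ∉ cs.take k1 := fun hmem => hmc (List.mem_of_mem_take hmem)
      rw [hsplit1]
      apply ok_no_trail _ _ hnoti hnotc1
      rw [← hsplit1]
      exact getLast?_ne_close cs hmc
  · by_cases hmc : ')' ∈ cs
    · -- a ')' with no '(' before it: both sides are False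
      obtain ⟨h0j, hdj, hnotj⟩ := findChar_split cs ')' hmc
      set k2 := (PySem.Chars.find cs [')']).toNat with hk2
      have hfi : PySem.Chars.find cs ['('] = -1 := by
        rw [PySem.Chars.find_eq_neg_one_iff, mem_iff_singleton_infix]
        exact hmo
      have hfj_ne : ¬ PySem.Chars.find cs [')'] = -1 := by omega
      rw [if_neg (fun h => hfj_ne h.2), if_pos (Or.inl hfi)]
      have hsplit2 : cs = cs.take k2 ++ ')' :: cs.drop (k2 + 1) := by
        conv_lhs => rw [← List.take_append_drop k2 cs, hdj]
      have hno : '(' ∉ cs.take k2 := fun hmem => hmo (List.mem_of_mem_take hmem)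
      rw [hsplit2]
      exact ok_first_close _ _ hno hnotj
    · -- no parentheses at all: both sides are True
      have hfi : PySem.Chars.find cs ['('] = -1 := by
        rw [PySem.Chars.find_eq_neg_one_iff, mem_iff_singleton_infix]
        exact hmo
      have hfj : PySem.Chars.find cs [')'] = -1 := by
        rw [PySem.Chars.find_eq_neg_one_iff, mem_iff_singleton_infix]
        exact hmc
      rw [if_pos ⟨hfi, hfj⟩]
      exact ok_no_parens cs fun c hc =>
        ⟨fun h => hmo (h ▸ hc), fun h => hmc (h ▸ hc)⟩
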